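-- pv_equiv track=rewrite | github.com/KU-RIAS/Keyword-Extraction-for-Pathology-Reports-with-BERT | Postprocess.py | untokenizing
-- ===== SOURCE A (Python) =====
-- def untokenizing(tokenized_text):
--     report = ""
--     for ss in tokenized_text:
--         if not ss.startswith('##'):
--             report += ' ' + ss
--         else:
--             report += ss[2:]
--     return report.strip()
-- ===== SOURCE B (Python) =====
-- def untokenizing(tokenized_text):
--     text = ' ' + ' '.join(tokenized_text)
--     return text.replace(' ##', '').strip()
-- ===== Notes on version B (the rewrite author's own statement) =====
-- stated objective: idiomatic
-- what changed: Replaces the per-token branch-and-accumulate loop by one whole-string transform: prepend a space, join with spaces, delete every ' ##' occurrence with str.replace, then strip.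
-- outside the precondition, e.g. on untokenizing(['a ##b']): A returns 'a ##b', B returns 'ab'
import Mathlib
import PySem

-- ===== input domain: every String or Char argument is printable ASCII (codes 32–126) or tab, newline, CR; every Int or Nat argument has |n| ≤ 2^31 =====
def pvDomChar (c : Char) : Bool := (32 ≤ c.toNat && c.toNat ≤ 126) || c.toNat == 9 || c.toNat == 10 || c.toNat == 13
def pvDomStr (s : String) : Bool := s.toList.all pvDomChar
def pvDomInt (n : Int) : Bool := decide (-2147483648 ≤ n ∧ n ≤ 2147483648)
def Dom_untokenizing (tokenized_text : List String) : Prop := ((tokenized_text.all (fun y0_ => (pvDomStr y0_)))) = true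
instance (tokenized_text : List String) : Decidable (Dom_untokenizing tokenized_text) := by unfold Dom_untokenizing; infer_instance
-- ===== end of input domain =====

-- B detokenizes with one whole-string join/replace/strip instead of A's per-token branch loop; equal on token lists in which no token contains the substring " ##".

-- ===== PORT A =====
def untokenizing (tokenized_text : List String) : String :=
  let report := tokenized_text.foldl
    (fun report ss =>
      if !(PySem.Str.startswith ss "##") then
        report ++ " " ++ ss
      else
        report ++ PySem.Str.slice ss (some 2) none)
    ""
  PySem.Str.strip report

-- ===== PORT B =====
def untokenizing_alt (tokenized_text : List String) : String :=
  let text := " " ++ PySem.Str.join " " tokenized_text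
  let text := PySem.Str.replace text " ##" ""
  PySem.Str.strip text

-- ===== PRECONDITION & SPEC =====
-- Pre_ restricts to the natural WordPiece domain: no token contains the substring " ##"
-- (a space immediately followed by "##" inside one token is malformed WordPiece input;
-- there A keeps the token verbatim while B's whole-string replace also fires inside it).
def Pre_untokenizing (tokenized_text : List String) : Prop :=
  ∀ t ∈ tokenized_text, PySem.Str.isIn " ##" t = false
instance (tokenized_text : List String) : Decidable (Pre_untokenizing tokenized_text) := by
  unfold Pre_untokenizing; infer_instance

def pvWitness_untokenizing : List String := ["The", "un", "##tok", "##enized", "text", "."]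

def Spec_untokenizing (tokenized_text : List String) (out : String) : Prop := out = untokenizing_alt tokenized_text
instance (tokenized_text : List String) (out : String) : Decidable (Spec_untokenizing tokenized_text out) := by unfold Spec_untokenizing; infer_instance

-- ===== CLAIM (what is proved, stated in full; the proofs are below) =====
def Claim_equal_untokenizing : Prop := ∀ (tokenized_text : List String), Dom_untokenizing tokenized_text → Pre_untokenizing tokenized_text → Spec_untokenizing tokenized_text (untokenizing tokenized_text)

-- ===== LEMMAS AND PROOFS =====

/-- The pattern " ##" as a character list. -/
def pvPat : List Char := [' ', '#', '#']

/-- One piece of A's report, on character lists. -/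
def pvPiece (t : List Char) : List Char :=
  if ['#', '#'].isPrefixOf t then t.drop 2 else ' ' :: t

/-- A's pre-strip report, on character lists. -/
def pvCore : List (List Char) → List Char
  | [] => []
  | t :: ts => pvPiece t ++ pvCore ts

/-- Space-joined body, on character lists. -/
def pvJ : List (List Char) → List Char
  | [] => []
  | [t] => t
  | t :: ts => t ++ ' ' :: pvJ ts

lemma pvJ_eq_intercalate (ts : List (List Char)) : List.intercalate [' '] ts = pvJ ts := by
  match ts with
  | [] => simp [pvJ, List.intercalate]
  | [t] => simp [pvJ, List.intercalate]
  | t :: t2 :: ts =>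
    have ih := pvJ_eq_intercalate (t2 :: ts)
    rw [show pvJ (t :: t2 :: ts) = t ++ ' ' :: pvJ (t2 :: ts) from rfl]
    simp only [List.intercalate, List.intersperse_cons₂, List.flatten_cons] at ih ⊢
    simp [ih]

/-- One scanning step of Python's str.replace. -/
lemma pv_go_cons (fuel : Nat) (c : Char) (l acc : List Char) :
    PySem.Chars.replace.go pvPat [] (fuel + 1) (c :: l) acc
      = if pvPat.isPrefixOf (c :: l) then
          PySem.Chars.replace.go pvPat [] fuel (List.drop pvPat.length (c :: l)) acc
        else PySem.Chars.replace.go pvPat [] fuel l (c :: acc) := by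
  simp [PySem.Chars.replace.go]

lemma pv_go_nil (fuel : Nat) (acc : List Char) :
    PySem.Chars.replace.go pvPat [] fuel [] acc = acc.reverse := by
  cases fuel <;> simp [PySem.Chars.replace.go]

/-- replace.go scans past a region where the pattern never matches. -/
lemma pv_go_skip (u v acc : List Char) (fuel : Nat) (hf : u.length ≤ fuel)
    (h : ∀ i, i < u.length → ¬ pvPat <+: (u.drop i ++ v)) :
    PySem.Chars.replace.go pvPat [] fuel (u ++ v) acc
      = PySem.Chars.replace.go pvPat [] (fuel - u.length) v (u.reverse ++ acc) := by
  induction u generalizing fuel acc with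
  | nil => simp
  | cons c u ih =>
    match fuel, hf with
    | fuel + 1, hf =>
      have h0 : pvPat.isPrefixOf (c :: u ++ v) = false := by
        rw [Bool.eq_false_iff]
        intro hp
        exact h 0 (by simp) (by simpa using (List.isPrefixOf_iff_prefix.1 hp))
      rw [show (c :: u) ++ v = c :: (u ++ v) from rfl, pv_go_cons, if_neg (by simp_all)]
      rw [ih (c :: acc) fuel (by simpa using Nat.lt_succ_iff.mp (Nat.lt_succ_of_le hf))
            (fun i hi => by simpa using h (i+1) (by simpa using Nat.succ_lt_succ hi))]
      simp [Nat.succ_sub_succ]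

/-- No occurrence of " ##" starts inside a " ##"-free token followed by nothing or a space. -/
lemma pv_no_match (t rest : List Char) (ht : ¬ pvPat <:+: t)
    (hrest : rest = [] ∨ ∃ w, rest = ' ' :: w) :
    ∀ i, i < t.length → ¬ pvPat <+: (t.drop i ++ rest) := by
  have key : ∀ s : List Char, s ≠ [] → s <:+ t → ¬ pvPat <+: (s ++ rest) := by
    intro s hne hsuf hp
    match s with
    | c1 :: s1 =>
      simp only [pvPat, List.cons_append, List.cons_prefix_cons] at hp
      obtain ⟨rfl, hp⟩ := hp
      match s1 with
      | [] =>
        rcases hrest with rfl | ⟨w, rfl⟩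
        · simp at hp
        · simp [List.cons_prefix_cons] at hp
      | c2 :: s2 =>
        simp only [List.cons_append, List.cons_prefix_cons] at hp
        obtain ⟨rfl, hp⟩ := hp
        match s2 with
        | [] =>
          rcases hrest with rfl | ⟨w, rfl⟩
          · simp at hp
          · simp [List.cons_prefix_cons] at hp
        | c3 :: s3 =>
          simp only [List.cons_append, List.cons_prefix_cons] at hp
          obtain ⟨rfl, -⟩ := hp
          exact ht (((show pvPat <+: ' ' :: '#' :: '#' :: s3 by simp [pvPat]).isInfix).trans hsuf.isInfix)
  intro i hi
  exact key _ (by intro h; have := congrArg List.length h; simp at this; omega) (List.drop_suffix i t)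

/-- The pattern never matches at the space in front of a token that does not start with "##". -/
lemma pv_no_match_head (t w : List Char) (h : ¬ ['#', '#'].isPrefixOf t = true)
    (hw : w = [] ∨ ∃ w', w = ' ' :: w') :
    pvPat.isPrefixOf (' ' :: (t ++ w)) = false := by
  rw [Bool.eq_false_iff]
  intro hp
  replace hp := List.isPrefixOf_iff_prefix.1 hp
  simp only [pvPat, List.cons_prefix_cons, true_and] at hp
  match t with
  | [] =>
    rcases hw with rfl | ⟨w', rfl⟩
    · simp at hp
    · simp [List.cons_prefix_cons] at hp
  | [c] =>
    simp only [List.cons_append, List.nil_append, List.cons_prefix_cons] at hp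
    obtain ⟨rfl, hp⟩ := hp
    rcases hw with rfl | ⟨w', rfl⟩
    · simp at hp
    · simp [List.cons_prefix_cons] at hp
  | c1 :: c2 :: t' =>
    simp only [List.cons_append, List.cons_prefix_cons] at hp
    obtain ⟨rfl, rfl, -⟩ := hp
    exact h (by simp [List.isPrefixOf])

/-- Main scan lemma: on a nonempty token list with no " ##" inside a token,
    the left-to-right replace of " ##" by "" over the space-prefixed join is A's report. -/
lemma pv_main (ts : List (List Char)) (t : List Char) (fuel : Nat) (acc : List Char)
    (hts : ∀ u ∈ t :: ts, ¬ pvPat <:+: u)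
    (hf : (pvJ (t :: ts)).length + 1 ≤ fuel) :
    PySem.Chars.replace.go pvPat [] fuel (' ' :: pvJ (t :: ts)) acc
      = acc.reverse ++ pvCore (t :: ts) := by
  induction ts generalizing t fuel acc with
  | nil =>
    have ht := hts t (by simp)
    rw [show pvJ [t] = t from rfl] at hf ⊢
    match fuel, hf with
    | fuel + 1, hf =>
      by_cases hpp : ['#', '#'].isPrefixOf t = true
      · obtain ⟨u, rfl⟩ := List.isPrefixOf_iff_prefix.1 hpp
        rw [pv_go_cons, if_pos (by simp [pvPat, List.isPrefixOf])]
        have hd : List.drop pvPat.length (' ' :: (['#','#'] ++ u)) = u ++ [] := by simp [pvPat]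
        rw [hd]
        rw [pv_go_skip u [] acc fuel (by simp at hf ⊢; omega)
              (pv_no_match u [] (fun hi => ht (hi.trans (List.suffix_append ['#','#'] u).isInfix)) (Or.inl rfl))]
        rw [pv_go_nil]
        simp [pvCore, pvPiece]
      · rw [show (' ' :: t) = ' ' :: (t ++ []) from by simp, pv_go_cons,
            if_neg (by rw [pv_no_match_head t [] hpp (Or.inl rfl)]; simp)]
        rw [pv_go_skip t [] (' ' :: acc) fuel (by simp at hf ⊢; omega)
              (pv_no_match t [] ht (Or.inl rfl))]
        rw [pv_go_nil]
        simp [pvCore, pvPiece, hpp]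
  | cons t2 ts ih =>
    have ht := hts t (by simp)
    rw [show pvJ (t :: t2 :: ts) = t ++ ' ' :: pvJ (t2 :: ts) from rfl] at hf ⊢
    match fuel, hf with
    | fuel + 1, hf =>
      by_cases hpp : ['#', '#'].isPrefixOf t = true
      · obtain ⟨u, rfl⟩ := List.isPrefixOf_iff_prefix.1 hpp
        rw [pv_go_cons, if_pos (by simp [pvPat, List.isPrefixOf])]
        have hd : List.drop pvPat.length (' ' :: (['#','#'] ++ u ++ ' ' :: pvJ (t2 :: ts))) = u ++ ' ' :: pvJ (t2 :: ts) := by simp [pvPat]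
        rw [hd]
        rw [pv_go_skip u (' ' :: pvJ (t2 :: ts)) acc fuel (by simp at hf ⊢; omega)
              (pv_no_match u _ (fun hi => ht (hi.trans (List.suffix_append ['#','#'] u).isInfix)) (Or.inr ⟨_, rfl⟩))]
        rw [ih t2 (fuel - u.length) (u.reverse ++ acc)
              (fun x hx => hts x (by simp at hx ⊢; tauto)) (by simp at hf ⊢; omega)]
        simp [pvCore, pvPiece]
      · rw [show (' ' :: (t ++ ' ' :: pvJ (t2 :: ts))) = ' ' :: (t ++ (' ' :: pvJ (t2 :: ts))) from rfl]
        rw [pv_go_cons, if_neg (by rw [pv_no_match_head t _ hpp (Or.inr ⟨_, rfl⟩)]; simp)]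
        rw [pv_go_skip t (' ' :: pvJ (t2 :: ts)) (' ' :: acc) fuel (by simp at hf ⊢; omega)
              (pv_no_match t _ ht (Or.inr ⟨_, rfl⟩))]
        rw [ih t2 (fuel - t.length) (t.reverse ++ ' ' :: acc)
              (fun u hu => hts u (by simp at hu ⊢; tauto)) (by simp at hf ⊢; omega)]
        simp [pvCore, pvPiece, hpp]

/-- A's accumulation loop, characterised on character lists. -/
lemma pv_report (ts : List String) (r : String) :
    (ts.foldl
      (fun report ss =>
        if !(PySem.Str.startswith ss "##") then report ++ " " ++ ss
        else report ++ PySem.Str.slice ss (some 2) none) r).toList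
      = r.toList ++ pvCore (ts.map String.toList) := by
  induction ts generalizing r with
  | nil => simp [pvCore]
  | cons t ts ih =>
    rw [List.foldl_cons, ih]
    by_cases h : ['#','#'].isPrefixOf t.toList = true
    · rw [if_neg (by simp [PySem.Str.startswith_eq, PySem.Chars.startswith, h])]
      have hs : (PySem.Str.slice t (some 2) none).toList = t.toList.drop 2 := by
        rw [PySem.Str.toList_slice, PySem.Chars.slice_eq_listSlice,
            show ((2:Int)) = ((2:Nat):Int) from rfl, PySem.List.slice_from_natCast]
      simp [pvCore, pvPiece, h, hs]
    · rw [if_pos (by simp [PySem.Str.startswith_eq, PySem.Chars.startswith, h])]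
      simp [pvCore, pvPiece, h]

-- ===== VERDICT (by name: the statement is the Claim_ definition above) =====
theorem untokenizing_spec : Claim_equal_untokenizing := by
  intro ts _ hpre
  unfold Spec_untokenizing
  apply String.toList_inj.mp
  match ts with
  | [] =>
    unfold untokenizing untokenizing_alt
    rw [PySem.Str.toList_strip, PySem.Str.toList_strip, PySem.Str.toList_replace]
    decide
  | t :: ts =>
    have hts : ∀ u ∈ t.toList :: ts.map String.toList, ¬ pvPat <:+: u := by
      intro u hu hinf
      simp only [List.mem_cons, List.mem_map] at hu
      have : ∃ s ∈ t :: ts, u = s.toList := by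
        rcases hu with rfl | ⟨s, hs, rfl⟩
        · exact ⟨t, by simp⟩
        · exact ⟨s, by simp [hs]⟩
      obtain ⟨s, hs, rfl⟩ := this
      have := hpre s hs
      rw [← Bool.not_eq_true, PySem.Str.isIn_iff_infix] at this
      exact this hinf
    have hjoin : (" " ++ PySem.Str.join " " (t :: ts)).toList
        = ' ' :: pvJ (t.toList :: ts.map String.toList) := by
      simp [PySem.Str.toList_join, PySem.Chars.join, pvJ_eq_intercalate]
    unfold untokenizing untokenizing_alt
    rw [PySem.Str.toList_strip, PySem.Str.toList_strip, PySem.Str.toList_replace, hjoin,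
        show (" ##" : String).toList = pvPat from rfl, show ("" : String).toList = [] from rfl,
        PySem.Chars.replace, if_neg (by simp [pvPat]), pv_main _ _ _ _ hts (by simp),
        pv_report (t :: ts) ""]
    simp
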